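-- pv_equiv track=rewrite | github.com/amirabdullahi1/gold | CSC 421/Assignments/Assn2/a2_q1234.py | recursive_eval
-- ===== SOURCE A (Python) =====
-- def evaluate(s: str):
--     operator = s[0]
--     operands = s[1:]
--
--     if operator == '&':
--         if 'Z' in operands:
--             return 'Z'
--         if 'U' in operands:
--             return 'U'
--         return 'O'
--
--     if operator == '|':
--         if 'O' in operands:
--             return 'O'
--         if 'U' in operands:
--             return 'U'
--         return 'Z'
--
-- def recursive_eval(l):
--     head, tail = l[0], l[1:]
--     if head in ['&', '|']:
--         val1, tail = recursive_eval(tail)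
--         val2, tail = recursive_eval(tail)
--         if head == '&':
--             return (evaluate('&' + val1 + val2), tail)
--         elif head == '|':
--             return (evaluate('|' + val1 + val2), tail)
--     # operator is a value
--     else:
--         return (head,tail)
-- ===== SOURCE B (Python) =====
-- def _combine(op, v1, v2):
--     s = v1 + v2
--     if op == '&':
--         if 'Z' in s:
--             return 'Z'
--         if 'U' in s:
--             return 'U'
--         return 'O'
--     else:
--         if 'O' in s:
--             return 'O'
--         if 'U' in s:
--             return 'U'
--         return 'Z'
--
-- def recursive_eval(l):
--     # iterative prefix evaluator: explicit stack of pending operators instead of recursion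
--     stack = []  # entries [op, first_operand_or_None]
--     i = 0
--     while True:
--         tok = l[i]
--         i += 1
--         if tok == '&' or tok == '|':
--             stack.append([tok, None])
--             continue
--         val = tok
--         while stack and stack[-1][1] is not None:
--             op, v1 = stack.pop()
--             val = _combine(op, v1, val)
--         if not stack:
--             return (val, l[i:])
--         stack[-1][1] = val
-- ===== Notes on version B (the rewrite author's own statement) =====
-- stated objective: alternative
-- what changed: Replaces A's mutual recursion over the token list with a single left-to-right iterative scan maintaining an explicit stack of pending operator frames, reducing a frame as soon as its second operand arrives.
import Mathlib
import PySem

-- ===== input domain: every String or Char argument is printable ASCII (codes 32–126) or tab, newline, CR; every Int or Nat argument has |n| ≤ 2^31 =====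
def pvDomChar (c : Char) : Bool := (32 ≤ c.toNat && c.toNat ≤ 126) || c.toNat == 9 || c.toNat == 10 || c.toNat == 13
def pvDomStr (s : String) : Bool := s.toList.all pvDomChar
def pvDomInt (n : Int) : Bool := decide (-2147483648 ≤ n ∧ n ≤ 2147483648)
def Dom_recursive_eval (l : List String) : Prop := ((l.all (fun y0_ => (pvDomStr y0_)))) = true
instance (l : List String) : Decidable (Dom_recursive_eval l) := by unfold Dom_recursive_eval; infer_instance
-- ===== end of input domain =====

-- B replaces A's recursion with an explicit-stack iterative prefix evaluator (objective: alternative decomposition).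

-- ===== PORT A =====
-- evaluate(s): s[0], s[1:], 'Z' in operands …; returns none where Python returns None (operator not '&'/'|')
def evaluate (s : String) : Option String :=
  match PySem.Str.pyGet? s 0 with
  | none => none                         -- IndexError on empty s (never reached by recursive_eval's calls)
  | some operator =>
    let operands := PySem.Str.slice s (some 1) none
    if operator = '&' then
      some (if PySem.Str.isIn "Z" operands then "Z"
            else if PySem.Str.isIn "U" operands then "U" else "O")
    else if operator = '|' then
      some (if PySem.Str.isIn "O" operands then "O"
            else if PySem.Str.isIn "U" operands then "U" else "Z")
    else none

-- fuel = recursion depth bound; each nested call works on a strictly shorter list, so fuel = l.length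
-- suffices, and fuel exhaustion coincides with Python's IndexError (l[0] on []) — none = A raises.
def recursive_evalAux : Nat → List String → Option (String × List String)
  | 0, _ => none
  | _, [] => none                        -- l[0] on empty list: IndexError
  | fuel + 1, head :: tail =>
    if head = "&" ∨ head = "|" then
      match recursive_evalAux fuel tail with
      | none => none
      | some (val1, t1) =>
        match recursive_evalAux fuel t1 with
        | none => none
        | some (val2, t2) =>
          if head = "&" then
            match evaluate ("&" ++ val1 ++ val2) with
            | none => none
            | some v => some (v, t2)
          else
            match evaluate ("|" ++ val1 ++ val2) with
            | none => none
            | some v => some (v, t2)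
    else some (head, tail)

def recursive_eval (l : List String) : String × List String :=
  (recursive_evalAux l.length l).getD ("", [])

-- ===== PORT B =====
-- _combine(op, v1, v2) of Source B
def pyCombine (op v1 v2 : String) : String :=
  let s := v1 ++ v2
  if op = "&" then
    if PySem.Str.isIn "Z" s then "Z" else if PySem.Str.isIn "U" s then "U" else "O"
  else
    if PySem.Str.isIn "O" s then "O" else if PySem.Str.isIn "U" s then "U" else "Z"

-- Source B's inner 'while stack and stack[-1][1] is not None' reduction loop
def reduceStk : List (String × Option String) → String → String × List (String × Option String)
  | (op, some v1) :: stk, v => reduceStk stk (pyCombine op v1 v)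
  | stk, v => (v, stk)

-- Source B's outer 'while True' loop: consume one token per step, stack of pending frames; none = IndexError at l[i]
def altLoop : List String → List (String × Option String) → Option (String × List String)
  | [], _ => none
  | tok :: rest, stack =>
    if tok = "&" ∨ tok = "|" then
      altLoop rest ((tok, none) :: stack)
    else
      match reduceStk stack tok with
      | (val, []) => some (val, rest)
      | (val, (op, _) :: stk') => altLoop rest ((op, some val) :: stk')

def recursive_eval_alt (l : List String) : String × List String :=
  (altLoop l []).getD ("", [])

-- ===== PRECONDITION & SPEC =====
-- A (and B) raise IndexError exactly when no prefix of l forms one complete prefix expression;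
-- a prefix of length k is complete iff #values = #operators + 1, i.e. 2·#operators + 1 = k.
def Pre_recursive_eval (l : List String) : Prop :=
  ∃ k ≤ l.length, ((l.take k).countP (fun s => s == "&" || s == "|")) * 2 + 1 = k
instance (l : List String) : Decidable (Pre_recursive_eval l) := by
  unfold Pre_recursive_eval; infer_instance
def pvWitness_recursive_eval : List String := ["&", "Z", "O"]

def Spec_recursive_eval (l : List String) (out : String × List String) : Prop := out = recursive_eval_alt l
instance (l : List String) (out : String × List String) : Decidable (Spec_recursive_eval l out) := by
  unfold Spec_recursive_eval; infer_instance

-- ===== CLAIM (what is proved, stated in full; the proofs are below) =====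
def Claim_equal_recursive_eval : Prop :=
  ∀ (l : List String), Dom_recursive_eval l → Pre_recursive_eval l → Spec_recursive_eval l (recursive_eval l)

-- ===== LEMMAS AND PROOFS =====

-- 'feed a finished value v into the stack, with t the unconsumed suffix': the state of B's outer loop
-- right after its inner reduction starts
def pvFeed (stack : List (String × Option String)) (v : String) (t : List String) :
    Option (String × List String) :=
  match reduceStk stack v with
  | (val, []) => some (val, t)
  | (val, (op, _) :: stk') => altLoop t ((op, some val) :: stk')

lemma pvFeed_push (op v1 : String) (stack : List (String × Option String)) (v : String)
    (t : List String) : pvFeed ((op, some v1) :: stack) v t = pvFeed stack (pyCombine op v1 v) t := by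
  simp [pvFeed, reduceStk]

lemma evaluate_amp (v1 v2 : String) :
    evaluate ("&" ++ v1 ++ v2) = some (pyCombine "&" v1 v2) := by
  simp [evaluate, pyCombine, PySem.Str.isIn, PySem.Str.slice, PySem.List.slice_from_one,
    String.toList_append]

lemma evaluate_bar (v1 v2 : String) :
    evaluate ("|" ++ v1 ++ v2) = some (pyCombine "|" v1 v2) := by
  simp [evaluate, pyCombine, PySem.Str.isIn, PySem.Str.slice, PySem.List.slice_from_one,
    String.toList_append]

-- the recursive evaluator and the stack machine agree step by step
lemma aux_altLoop : ∀ (fuel : Nat) (l : List String), l.length ≤ fuel →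
    (recursive_evalAux fuel l = none → ∀ stack, altLoop l stack = none) ∧
    (∀ v t, recursive_evalAux fuel l = some (v, t) →
        t.length ≤ l.length ∧ ∀ stack, altLoop l stack = pvFeed stack v t) := by
  intro fuel
  induction fuel with
  | zero =>
    intro l hlen
    have : l = [] := List.eq_nil_of_length_eq_zero (Nat.le_zero.mp hlen)
    subst this
    exact ⟨fun _ stack => rfl, fun v t h => by simp [recursive_evalAux] at h⟩
  | succ fuel ih =>
    intro l hlen
    match l with
    | [] => exact ⟨fun _ stack => rfl, fun v t h => by simp [recursive_evalAux] at h⟩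
    | head :: tail =>
      have htail : tail.length ≤ fuel := by simpa using hlen
      by_cases hop : head = "&" ∨ head = "|"
      · obtain ⟨ih1n, ih1s⟩ := ih tail htail
        cases h1 : recursive_evalAux fuel tail with
        | none =>
          refine ⟨fun _ stack => ?_, fun v t h => ?_⟩
          · simp only [altLoop, if_pos hop]
            exact ih1n h1 _
          · simp [recursive_evalAux, if_pos hop, h1] at h
        | some vt1 =>
          obtain ⟨v1, t1⟩ := vt1
          obtain ⟨hlen1, hfeed1⟩ := ih1s v1 t1 h1
          have ht1 : t1.length ≤ fuel := le_trans hlen1 htail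
          obtain ⟨ih2n, ih2s⟩ := ih t1 ht1
          have hstep : ∀ stack, altLoop (head :: tail) stack = altLoop t1 ((head, some v1) :: stack) := by
            intro stack
            simp only [altLoop, if_pos hop]
            rw [hfeed1 ((head, none) :: stack)]
            simp [pvFeed, reduceStk]
          cases h2 : recursive_evalAux fuel t1 with
          | none =>
            refine ⟨fun _ stack => ?_, fun v t h => ?_⟩
            · rw [hstep stack]; exact ih2n h2 _
            · simp [recursive_evalAux, if_pos hop, h1, h2] at h
          | some vt2 =>
            obtain ⟨v2, t2⟩ := vt2
            obtain ⟨hlen2, hfeed2⟩ := ih2s v2 t2 h2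
            have hval : recursive_evalAux (fuel + 1) (head :: tail) = some (pyCombine head v1 v2, t2) := by
              rcases hop with h | h <;> subst h <;>
                simp [recursive_evalAux, h1, h2, evaluate_amp, evaluate_bar]
            refine ⟨fun h _ => by rw [hval] at h; exact absurd h (by simp), fun v t h => ?_⟩
            rw [hval] at h
            injection h with h'
            obtain ⟨rfl, rfl⟩ := Prod.mk.inj h'
            refine ⟨by simpa using le_trans hlen2 (le_trans hlen1 (Nat.le_succ _)), fun stack => ?_⟩
            rw [hstep stack, hfeed2 ((head, some v1) :: stack), pvFeed_push]
      · refine ⟨fun h stack => ?_, fun v t h => ?_⟩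
        · simp [recursive_evalAux, if_neg hop] at h
        · simp only [recursive_evalAux, if_neg hop] at h
          injection h with h'
          obtain ⟨rfl, rfl⟩ := Prod.mk.inj h'
          refine ⟨Nat.le_succ _, fun stack => ?_⟩
          simp only [altLoop, if_neg hop, pvFeed]

lemma ports_eq (l : List String) : recursive_eval l = recursive_eval_alt l := by
  unfold recursive_eval recursive_eval_alt
  obtain ⟨hn, hs⟩ := aux_altLoop l.length l le_rfl
  cases h : recursive_evalAux l.length l with
  | none => rw [hn h []]
  | some vt =>
    obtain ⟨v, t⟩ := vt
    rw [(hs v t h).2 []]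
    simp [pvFeed, reduceStk]

-- ===== VERDICT (by name: the statement is the Claim_ definition above) =====
theorem recursive_eval_spec : Claim_equal_recursive_eval := by
  intro l _ _
  unfold Spec_recursive_eval
  exact ports_eq l
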